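-- pv_equiv track=rewrite | github.com/caucasusuni/students | Final prep.py | shekvetis_gaketeba
-- ===== SOURCE A (Python) =====
-- def shekvetis_gaketeba(shekveta):
--     products = ["xachapuri", "xinkali", "mcvadi", "kababi", "salata"]
--     counts = {i: 0 for i in products}
--     items = shekveta.split()
--     for i in items:
--         if i in products:
--             counts[i] += 1
--
--     result = ""
--     for i in products:
--         count = counts[i]
--         if result != "":
--             result += " "
--         result += i + ": " + str(count)
--
--     return result
-- ===== SOURCE B (Python) =====
-- def shekvetis_gaketeba(shekveta):
--     products = ["xachapuri", "xinkali", "mcvadi", "kababi", "salata"]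
--     hits = sorted(t for t in shekveta.split() if t in products)
--     counts = {}
--     i = 0
--     n = len(hits)
--     while i < n:
--         j = i
--         while j < n and hits[j] == hits[i]:
--             j += 1
--         counts[hits[i]] = counts.get(hits[i], 0) + (j - i)
--         i = j
--     return " ".join(p + ": " + str(counts.get(p, 0)) for p in products)
-- ===== Notes on version B (the rewrite author's own statement) =====
-- stated objective: alternative
-- what changed: Replaces A's dict-counting pass over all tokens plus formatting pass by a sort-then-scan algorithm: filter the tokens to known products, sort them, obtain each count by a two-index run-length scan over adjacent equal elements, then join the formatted pairs with a space.
import Mathlib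
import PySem

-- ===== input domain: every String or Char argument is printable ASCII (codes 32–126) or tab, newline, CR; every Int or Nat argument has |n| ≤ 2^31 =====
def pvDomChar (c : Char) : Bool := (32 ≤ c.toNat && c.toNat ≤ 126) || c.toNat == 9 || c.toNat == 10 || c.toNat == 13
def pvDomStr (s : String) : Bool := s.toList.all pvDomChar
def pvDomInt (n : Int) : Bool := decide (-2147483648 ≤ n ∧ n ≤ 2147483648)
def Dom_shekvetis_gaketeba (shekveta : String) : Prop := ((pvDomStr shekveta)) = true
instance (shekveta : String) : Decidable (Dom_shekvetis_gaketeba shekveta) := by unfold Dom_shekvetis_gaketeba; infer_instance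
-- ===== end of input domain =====

-- B replaces A's dict-counting pass over all tokens by a sort-then-scan algorithm:
-- filter tokens to known products, sort, take counts from a run-length scan (objective: alternative).

-- ===== PORT A =====
def shekvetis_gaketeba (shekveta : String) : String :=
  let products : List String := ["xachapuri", "xinkali", "mcvadi", "kababi", "salata"]
  -- counts = {i: 0 for i in products}
  let counts : PySem.Dict String Int :=
    products.foldl (fun d i => d.insert i 0) PySem.Dict.empty
  let items := PySem.Str.split₀ shekveta
  -- for i in items: if i in products: counts[i] += 1
  let counts :=
    items.foldl (fun d i => if products.contains i then d.insert i (d.getD i 0 + 1) else d) counts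
  -- result-building loop with the manual separator branch
  let result :=
    products.foldl (fun result i =>
      let count := counts.getD i 0
      let result := if result ≠ "" then result ++ " " else result
      result ++ (i ++ ": " ++ PySem.Int.toStr count)) ""
  result

-- ===== PORT B =====
-- B's two-index while loop: the inner 'while j < n and hits[j] == hits[i]' advances j over the
-- leading run of elements equal to hits[i]; ported exactly as takeWhile (the run, j - i = its
-- length) / dropWhile (the remaining suffix, i = j).
def pvRuns : List String → PySem.Dict String Int → PySem.Dict String Int
  | [], counts => counts
  | h :: t, counts =>
      let run := (h :: t).takeWhile (fun x => x == h)
      pvRuns ((h :: t).dropWhile (fun x => x == h))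
        (counts.insert h (counts.getD h 0 + (run.length : Int)))
  termination_by xs => xs.length
  decreasing_by
    simp only [List.dropWhile_cons, beq_self_eq_true, if_true]
    have := List.length_dropWhile_le (fun x => x == h) t
    simp only [List.length_cons]; omega

def shekvetis_gaketeba_alt (shekveta : String) : String :=
  let products : List String := ["xachapuri", "xinkali", "mcvadi", "kababi", "salata"]
  let hits := PySem.List.sorted ((PySem.Str.split₀ shekveta).filter (fun t => products.contains t))
                (fun x => x) false
  let counts := pvRuns hits PySem.Dict.empty
  PySem.Str.join " " (products.map (fun p => p ++ ": " ++ PySem.Int.toStr (counts.getD p 0)))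

-- ===== PRECONDITION & SPEC =====
def Spec_shekvetis_gaketeba (shekveta : String) (out : String) : Prop := out = shekvetis_gaketeba_alt shekveta
instance (shekveta : String) (out : String) : Decidable (Spec_shekvetis_gaketeba shekveta out) := by unfold Spec_shekvetis_gaketeba; infer_instance

-- ===== CLAIM (what is proved, stated in full; the proofs are below) =====
def Claim_equal_shekvetis_gaketeba : Prop := ∀ (shekveta : String), Dom_shekvetis_gaketeba shekveta → Spec_shekvetis_gaketeba shekveta (shekvetis_gaketeba shekveta)

-- ===== LEMMAS AND PROOFS =====

-- A's guarded counting loop, started from the all-zero dict over the products, looks up to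
-- plain items.count p for every product p.
theorem pv_counts_getD (items : List String)
    (p : String) (hp : p ∈ (["xachapuri", "xinkali", "mcvadi", "kababi", "salata"] : List String)) :
    (items.foldl
        (fun d i => if (["xachapuri", "xinkali", "mcvadi", "kababi", "salata"] : List String).contains i
                    then d.insert i (d.getD i 0 + 1) else d)
        ((["xachapuri", "xinkali", "mcvadi", "kababi", "salata"] : List String).foldl
          (fun d i => d.insert i 0) PySem.Dict.empty)).getD p 0
      = (items.count p : Int) := by
  rw [← List.foldl_filter]
  rw [PySem.Dict.getD_foldl_insert_add_one]
  rw [List.count_filter (by simpa using hp)]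
  fin_cases hp <;> simp <;> decide

-- The run-length scan accumulates exactly the multiplicity of every element.
theorem pv_runs_getD (xs : List String) (d : PySem.Dict String Int) (p : String) :
    (pvRuns xs d).getD p 0 = d.getD p 0 + (xs.count p : Int) := by
  induction hn : xs.length using Nat.strong_induction_on generalizing xs d with
  | _ n ih =>
    cases xs with
    | nil => simp [pvRuns]
    | cons h t =>
      rw [pvRuns]
      have hdrop : ((h :: t).dropWhile (fun x => x == h)).length < n := by
        simp only [List.dropWhile_cons, beq_self_eq_true, if_true]
        have := List.length_dropWhile_le (fun x => x == h) t
        simp only [← hn, List.length_cons]; omega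
      rw [ih _ hdrop _ _ rfl]
      have hsplit : ((h :: t).takeWhile (fun x => x == h)).count p
            + ((h :: t).dropWhile (fun x => x == h)).count p = (h :: t).count p := by
        conv_rhs => rw [← List.takeWhile_append_dropWhile (p := fun x => x == h) (l := h :: t)]
        rw [List.count_append]
      rw [PySem.Dict.getD_insert]
      by_cases hph : p = h
      · subst hph
        have hcnt : ((p :: t).takeWhile (fun x => x == p)).count p
              = ((p :: t).takeWhile (fun x => x == p)).length := by
          rw [List.count_eq_length]
          intro b hb
          have hbp : (b == p) = true := List.mem_takeWhile_imp (p := fun x => x == p) hb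
          exact (eq_of_beq hbp).symm
        rw [hcnt] at hsplit; push_cast [← hsplit]; simp; ring
      · rw [if_neg hph]
        have hcnt : ((h :: t).takeWhile (fun x => x == h)).count p = 0 := by
          rw [List.count_eq_zero]
          intro hmem
          exact hph (by simpa using List.mem_takeWhile_imp hmem)
        omega

-- ' '.join of a five-element list, written out as appends.
theorem pv_join5 (a b c d e : String) :
    PySem.Str.join " " [a, b, c, d, e]
      = a ++ (" " ++ (b ++ (" " ++ (c ++ (" " ++ (d ++ (" " ++ e))))))) := by
  apply String.toList_inj.mp
  simp only [PySem.Str.join, PySem.Chars.join, String.toList_ofList, List.map,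
    String.toList_append]
  simp [List.intercalate, List.intersperse]

-- B's looked-up count for a product p is items.count p: run-length scan of the sorted
-- filtered list = count in the sorted list = count in the filtered list = count in items.
theorem pv_alt_count (items : List String) (p : String)
    (hp : p ∈ (["xachapuri", "xinkali", "mcvadi", "kababi", "salata"] : List String)) :
    (pvRuns (PySem.List.sorted (items.filter
        (fun t => (["xachapuri", "xinkali", "mcvadi", "kababi", "salata"] : List String).contains t))
        (fun x => x) false) PySem.Dict.empty).getD p 0 = (items.count p : Int) := by
  rw [pv_runs_getD]
  have hperm := PySem.List.sorted_perm (xs := items.filter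
      (fun t => (["xachapuri", "xinkali", "mcvadi", "kababi", "salata"] : List String).contains t))
      (key := fun x => x) (rev := false)
  rw [hperm.count_eq, List.count_filter (by simpa using hp)]
  simp [PySem.Dict.getD, PySem.Dict.get?, PySem.Dict.empty]

-- ===== VERDICT (by name: the statement is the Claim_ definition above) =====
theorem shekvetis_gaketeba_spec : Claim_equal_shekvetis_gaketeba := by
  intro s _
  show shekvetis_gaketeba s = shekvetis_gaketeba_alt s
  unfold shekvetis_gaketeba shekvetis_gaketeba_alt
  have h1 := pv_counts_getD (PySem.Str.split₀ s) "xachapuri" (by decide)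
  have h2 := pv_counts_getD (PySem.Str.split₀ s) "xinkali" (by decide)
  have h3 := pv_counts_getD (PySem.Str.split₀ s) "mcvadi" (by decide)
  have h4 := pv_counts_getD (PySem.Str.split₀ s) "kababi" (by decide)
  have h5 := pv_counts_getD (PySem.Str.split₀ s) "salata" (by decide)
  have g1 := pv_alt_count (PySem.Str.split₀ s) "xachapuri" (by decide)
  have g2 := pv_alt_count (PySem.Str.split₀ s) "xinkali" (by decide)
  have g3 := pv_alt_count (PySem.Str.split₀ s) "mcvadi" (by decide)
  have g4 := pv_alt_count (PySem.Str.split₀ s) "kababi" (by decide)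
  have g5 := pv_alt_count (PySem.Str.split₀ s) "salata" (by decide)
  simp only [List.foldl, List.map] at h1 h2 h3 h4 h5 g1 g2 g3 g4 g5 ⊢
  rw [h1, h2, h3, h4, h5, g1, g2, g3, g4, g5, pv_join5]
  simp [String.append_assoc]
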